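-- pv_equiv track=rewrite | github.com/AlphonsaJo/Honeywell-ARM | vsudot1.py | vsudot_python
-- ===== SOURCE A (Python) =====
-- def vsudot_python(vec_a, vec_b):
--     """Simulate VSUDOT operation in Python"""
--     assert len(vec_a) == len(vec_b)
--     size = len(vec_a)
--     result = []
--     for i in range(0, size, 8):
--         chunk_a = vec_a[i:i+8]
--         chunk_b = vec_b[i:i+8]
--         dot_product = sum(a * b for a, b in zip(chunk_a, chunk_b))
--         result.append(dot_product)
--     return result
-- ===== SOURCE B (Python) =====
-- def vsudot_python(vec_a, vec_b):
--     """Simulate VSUDOT: one flat pass with an accumulator, no slicing."""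
--     assert len(vec_a) == len(vec_b)
--     result = []
--     acc = 0
--     cnt = 0
--     for x, y in zip(vec_a, vec_b):
--         acc += x * y
--         cnt += 1
--         if cnt == 8:
--             result.append(acc)
--             acc = 0
--             cnt = 0
--     if cnt:
--         result.append(acc)
--     return result
-- ===== Notes on version B (the rewrite author's own statement) =====
-- stated objective: alternative
-- what changed: Replaced the stride-8 loop that slices out two 8-element chunks and dots each with a per-chunk genexp by a single flat pass over zip(vec_a, vec_b) maintaining a running accumulator and in-chunk counter, flushing every 8 elements and once more for a trailing partial chunk.
import Mathlib
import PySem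

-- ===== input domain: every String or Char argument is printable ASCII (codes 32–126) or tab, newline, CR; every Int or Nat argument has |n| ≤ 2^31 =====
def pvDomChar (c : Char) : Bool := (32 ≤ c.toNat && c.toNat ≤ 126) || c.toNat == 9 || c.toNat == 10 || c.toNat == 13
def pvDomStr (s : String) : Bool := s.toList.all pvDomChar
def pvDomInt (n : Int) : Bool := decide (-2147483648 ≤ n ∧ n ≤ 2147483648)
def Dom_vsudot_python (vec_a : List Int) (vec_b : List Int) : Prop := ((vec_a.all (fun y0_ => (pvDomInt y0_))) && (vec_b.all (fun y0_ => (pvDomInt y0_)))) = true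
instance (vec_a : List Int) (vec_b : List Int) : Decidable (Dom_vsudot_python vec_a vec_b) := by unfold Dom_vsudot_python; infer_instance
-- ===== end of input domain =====

-- B replaces A's stride-8 slicing loop by a single flat pass over the zipped
-- vectors with a running accumulator flushed every 8 elements (alternative
-- decomposition, same O(n) cost; neither program mutates its arguments).

-- ===== PORT A =====
def vsudot_python (vec_a : List Int) (vec_b : List Int) : List Int :=
  let size : Int := vec_a.length
  (PySem.List.pyRange 0 size 8).foldl (fun result i =>
    let chunk_a := PySem.List.slice vec_a (some i) (some (i + 8))
    let chunk_b := PySem.List.slice vec_b (some i) (some (i + 8))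
    let dot_product := ((chunk_a.zip chunk_b).map (fun p => p.1 * p.2)).sum
    result ++ [dot_product]) []

-- ===== PORT B =====
def vsudot_python_alt (vec_a : List Int) (vec_b : List Int) : List Int :=
  let fin := (vec_a.zip vec_b).foldl
    (fun (st : Int × Int × List Int) (p : Int × Int) =>
      let acc := st.1 + p.1 * p.2
      let cnt := st.2.1 + 1
      if cnt = 8 then (0, 0, st.2.2 ++ [acc]) else (acc, cnt, st.2.2))
    (0, 0, [])
  if fin.2.1 ≠ 0 then fin.2.2 ++ [fin.1] else fin.2.2

-- ===== PRECONDITION & SPEC =====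
-- Both A and B assert len(vec_a) == len(vec_b); Pre_ excludes exactly the
-- inputs on which that assert raises AssertionError.
def Pre_vsudot_python (vec_a : List Int) (vec_b : List Int) : Prop := vec_a.length = vec_b.length
instance (vec_a : List Int) (vec_b : List Int) : Decidable (Pre_vsudot_python vec_a vec_b) := by unfold Pre_vsudot_python; infer_instance
def pvWitness_vsudot_python : List Int × List Int := ([1, 2, 3, 4, 5, 6, 7, 8, 9], [9, 8, 7, 6, 5, 4, 3, 2, 1])

def Spec_vsudot_python (vec_a : List Int) (vec_b : List Int) (out : List Int) : Prop := out = vsudot_python_alt vec_a vec_b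
instance (vec_a : List Int) (vec_b : List Int) (out : List Int) : Decidable (Spec_vsudot_python vec_a vec_b out) := by unfold Spec_vsudot_python; infer_instance

-- ===== CLAIM (what is proved, stated in full; the proofs are below) =====
def Claim_equal_vsudot_python : Prop := ∀ (vec_a : List Int) (vec_b : List Int), Dom_vsudot_python vec_a vec_b → Pre_vsudot_python vec_a vec_b → Spec_vsudot_python vec_a vec_b (vsudot_python vec_a vec_b)

-- ===== LEMMAS AND PROOFS =====

-- Common reference value: sums of consecutive 8-element chunks of the product list.
def pvChunkSums (ps : List Int) : List Int :=
  if ps = [] then [] else (ps.take 8).sum :: pvChunkSums (ps.drop 8)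
termination_by ps.length
decreasing_by
  rename_i h
  have : 0 < ps.length := List.length_pos_iff.mpr h
  simp [List.length_drop]; omega

-- B's fold written as structural recursion on the pair list.
def pvS (ps : List (Int × Int)) (acc cnt : Int) : List Int :=
  match ps with
  | [] => if cnt ≠ 0 then [acc] else []
  | p :: ps' =>
    if cnt + 1 = 8 then (acc + p.1 * p.2) :: pvS ps' 0 0
    else pvS ps' (acc + p.1 * p.2) (cnt + 1)

lemma pvB_fold (ps : List (Int × Int)) : ∀ (acc cnt : Int) (res : List Int),
    (let fin := ps.foldl
      (fun (st : Int × Int × List Int) (p : Int × Int) =>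
        let a := st.1 + p.1 * p.2
        let c := st.2.1 + 1
        if c = 8 then (0, 0, st.2.2 ++ [a]) else (a, c, st.2.2))
      (acc, cnt, res)
     if fin.2.1 ≠ 0 then fin.2.2 ++ [fin.1] else fin.2.2)
    = res ++ pvS ps acc cnt := by
  induction ps with
  | nil => intro acc cnt res; by_cases h : cnt = 0 <;> simp [pvS, h]
  | cons p ps ih =>
    intro acc cnt res
    by_cases h : cnt + 1 = 8
    · simpa [pvS, h, List.append_assoc] using ih 0 0 (res ++ [acc + p.1 * p.2])
    · simpa [pvS, h] using ih (acc + p.1 * p.2) (cnt + 1) res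

lemma pvS_partial (ps : List (Int × Int)) : ∀ (k : Nat) (acc : Int), k < 8 →
    pvS ps acc (k : Int) =
      if ps = [] ∧ k = 0 then []
      else if ps.length + k ≤ 8 then [acc + (ps.map (fun p => p.1 * p.2)).sum]
      else (acc + ((ps.take (8 - k)).map (fun p => p.1 * p.2)).sum) ::
            pvS (ps.drop (8 - k)) 0 0 := by
  induction ps with
  | nil =>
    intro k acc hk
    by_cases h : k = 0 <;> simp [pvS, h]
  | cons p ps ih =>
    intro k acc hk
    by_cases h : k = 7
    · subst h
      by_cases hps : ps = []
      · simp [pvS, hps]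
      · have hlen : ¬ ((p :: ps).length + 7 ≤ 8) := by
          have : 0 < ps.length := List.length_pos_iff.mpr hps
          simp [List.length_cons]; omega
        simp [pvS, List.take, List.drop]
        intro h'; exact absurd h' hps
    · have hne : ¬ ((k : Int) + 1 = 8) := by omega
      have hcast : ((k : Int) + 1) = ((k + 1 : Nat) : Int) := by push_cast; ring
      rw [show pvS (p :: ps) acc (k : Int) = pvS ps (acc + p.1 * p.2) ((k : Int) + 1) by
        simp [pvS, hne]]
      rw [hcast, ih (k + 1) (acc + p.1 * p.2) (by omega)]
      by_cases hlen : ps.length + (k + 1) ≤ 8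
      · have hlen' : (p :: ps).length + k ≤ 8 := by simp [List.length_cons]; omega
        simp [hlen, add_assoc]
        exact fun h' => absurd h' (by omega)
      · have hlen' : ¬ ((p :: ps).length + k ≤ 8) := by simp [List.length_cons]; omega
        have htake : (p :: ps).take (8 - k) = p :: ps.take (8 - (k + 1)) := by
          rw [show 8 - k = (8 - (k + 1)) + 1 by omega]; rfl
        have hdrop : (p :: ps).drop (8 - k) = ps.drop (8 - (k + 1)) := by
          rw [show 8 - k = (8 - (k + 1)) + 1 by omega]; rfl
        simp [hlen, htake, hdrop, add_assoc]
        exact fun h' => absurd h' (by omega)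

lemma pvS_eq_chunkSums (ps : List (Int × Int)) :
    pvS ps 0 0 = pvChunkSums (ps.map (fun p => p.1 * p.2)) := by
  induction hn : ps.length using Nat.strong_induction_on generalizing ps with
  | _ n ih =>
    have h0 := pvS_partial ps 0 0 (by norm_num)
    norm_num at h0
    rw [h0]
    by_cases hps : ps = []
    · simp [hps, pvChunkSums]
    · rw [pvChunkSums]
      by_cases hlen : ps.length ≤ 8
      · have hd : ps.drop 8 = [] := List.drop_eq_nil_of_le hlen
        simp [hps, hlen, ← List.map_drop, hd, List.take_of_length_le, pvChunkSums]
      · have hpos : 0 < ps.length := by omega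
        subst hn
        rw [ih (ps.drop 8).length (by simp; omega) (ps.drop 8) rfl]
        simp [hps, hlen, List.map_drop]

lemma pvChunk_map (qs : List Int) :
    (List.range ((qs.length + 7) / 8)).map (fun k => ((qs.drop (8 * k)).take 8).sum)
      = pvChunkSums qs := by
  induction hn : qs.length using Nat.strong_induction_on generalizing qs with
  | _ n ih =>
    subst hn
    by_cases hqs : qs = []
    · simp [hqs, pvChunkSums]
    · have hpos : 0 < qs.length := List.length_pos_iff.mpr hqs
      have hm : (qs.length + 7) / 8 = (((qs.drop 8).length + 7) / 8) + 1 := by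
        simp [List.length_drop]; omega
      have htail : List.map ((fun k => ((qs.drop (8 * k)).take 8).sum) ∘ Nat.succ)
          (List.range (((qs.drop 8).length + 7) / 8)) = pvChunkSums (qs.drop 8) := by
        rw [← ih (qs.drop 8).length (by simp; omega) (qs.drop 8) rfl]
        apply List.map_congr_left
        intro k _
        simp [Function.comp, List.drop_drop]
        ring_nf
      rw [pvChunkSums, if_neg hqs, hm, List.range_succ_eq_map, List.map_cons, List.map_map,
          htail]
      simp

lemma pvA_eq_chunkSums (a b : List Int) (h : a.length = b.length) :
    vsudot_python a b = pvChunkSums ((a.zip b).map (fun p => p.1 * p.2)) := by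
  have hzlen : (a.zip b).length = a.length := by simp [h]
  rw [vsudot_python]
  rw [PySem.List.foldl_append_singleton_eq_map, PySem.List.pyRange_of_pos 0 (a.length : Int) (by norm_num)]
  have hcnt : (if (0:Int) < (a.length:Int) then ((((a.length:Int)) - 0 + 8 - 1) / 8).toNat else 0)
      = ((a.zip b).length + 7) / 8 := by
    rw [hzlen]
    by_cases h0 : 0 < a.length
    · rw [if_pos (by exact_mod_cast h0)]
      have : ((a.length:Int) - 0 + 8 - 1) = ((a.length + 7 : Nat) : Int) := by push_cast; ring
      rw [this, show ((8:Int)) = ((8:Nat):Int) from rfl, ← Int.natCast_div, Int.toNat_natCast]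
    · have : a.length = 0 := by omega
      simp [this]
  rw [hcnt, List.map_map, ← pvChunk_map ((a.zip b).map (fun p => p.1 * p.2))]
  rw [List.length_map, hzlen]
  apply List.map_congr_left
  intro k _
  have hsl : ∀ (xs : List Int), PySem.List.slice xs (some ((0:Int) + 8 * (k:Int))) (some ((0:Int) + 8 * (k:Int) + 8))
      = (xs.drop (8 * k)).take 8 := by
    intro xs
    rw [PySem.List.slice_toNat xs (by positivity) (by positivity)]
    congr 1
    · omega
    · congr 1; omega
  simp only [Function.comp]
  rw [hsl a, hsl b]
  rw [List.zip_eq_zipWith, ← List.take_zipWith, ← List.drop_zipWith, ← List.zip_eq_zipWith]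
  simp [List.map_take, List.map_drop]

-- ===== VERDICT (by name: the statement is the Claim_ definition above) =====
theorem vsudot_python_spec : Claim_equal_vsudot_python := by
  intro a b _ hpre
  unfold Spec_vsudot_python
  rw [pvA_eq_chunkSums a b hpre, ← pvS_eq_chunkSums]
  have := pvB_fold (a.zip b) 0 0 []
  simpa [vsudot_python_alt] using this.symm
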